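-- pv_equiv track=rewrite | github.com/gjentig4/workshop2 | dedup_images.py | find_similar_hashes
-- ===== SOURCE A (Python) =====
-- HASH_THRESHOLD = 5
--
-- def find_similar_hashes(hashes, threshold=HASH_THRESHOLD):
--     """Find groups of similar hashes using Hamming distance."""
--     # Convert hex strings to integers for comparison
--     hash_ints = {}
--     for url, h in hashes.items():
--         try:
--             hash_ints[url] = int(h, 16)
--         except:
--             continue
--
--     groups = []
--     processed = set()
--
--     for url1, h1 in hash_ints.items():
--         if url1 in processed:
--             continue
--
--         group = [url1]
--         processed.add(url1)
--
--         for url2, h2 in hash_ints.items():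
--             if url2 in processed:
--                 continue
--
--             # Compute Hamming distance
--             distance = bin(h1 ^ h2).count('1')
--             if distance <= threshold:
--                 group.append(url2)
--                 processed.add(url2)
--
--         if len(group) > 1:
--             groups.append(group)
--
--     return groups
-- ===== SOURCE B (Python) =====
-- HASH_THRESHOLD = 5
--
-- def find_similar_hashes(hashes, threshold=HASH_THRESHOLD):
--     """Find groups of similar hashes by recursively partitioning the
--     remaining items into close/far halves around the first item."""
--     items = []
--     for url, h in hashes.items():
--         try:
--             items.append((url, int(h, 16)))
--         except ValueError:
--             pass
--
--     groups = []
--     while items: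
--         (url1, h1), rest = items[0], items[1:]
--         close = [u for u, h in rest if bin(h1 ^ h).count('1') <= threshold]
--         items = [(u, h) for u, h in rest if bin(h1 ^ h).count('1') > threshold]
--         if close:
--             groups.append([url1] + close)
--     return groups
-- ===== Notes on version B (the rewrite author's own statement) =====
-- stated objective: alternative
-- what changed: A's nested full-dict scans guarded by a growing 'processed' set are replaced by a recursive partition: take the first remaining item, split the rest into close (the group) and far (the recursion argument), so no processed set and no skip-scans over already-grouped items.
import Mathlib
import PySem

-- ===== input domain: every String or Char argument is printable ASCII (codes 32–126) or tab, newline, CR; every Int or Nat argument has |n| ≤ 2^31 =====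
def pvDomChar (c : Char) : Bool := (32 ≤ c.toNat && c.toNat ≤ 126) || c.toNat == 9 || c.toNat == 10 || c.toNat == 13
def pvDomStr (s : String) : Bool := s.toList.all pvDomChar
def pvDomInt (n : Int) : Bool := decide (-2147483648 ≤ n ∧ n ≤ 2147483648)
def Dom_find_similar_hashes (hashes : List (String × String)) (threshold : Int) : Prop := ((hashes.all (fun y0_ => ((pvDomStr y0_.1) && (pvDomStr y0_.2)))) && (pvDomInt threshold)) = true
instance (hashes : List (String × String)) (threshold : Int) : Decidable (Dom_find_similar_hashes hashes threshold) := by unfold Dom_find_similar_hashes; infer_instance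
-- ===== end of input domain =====

-- B replaces A's nested dict scans over a processed-set by recursively partitioning the
-- remaining items into close/far around the first item (objective: alternative, same worst-case cost).


-- ===== PORT A =====
-- 'hash_ints[url] = int(h, 16)' loop of A (bare except skips ValueError = ofStrBase? none)
def fshHashInts (hashes : List (String × String)) : PySem.Dict String Int :=
  (PySem.Dict.ofList hashes).items.foldl (fun d p =>
    match PySem.Int.ofStrBase? p.2 16 with
    | some n => d.insert p.1 n
    | none => d) PySem.Dict.empty

-- inner loop 'for url2, h2 in hash_ints.items(): …' of A, state = (group, processed);
-- distance = bin(h1 ^ h2).count('1') = PySem.Int.bitCount (PySem.Int.bxor h1 h2) (both read |·|)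
def fshInnerStep (threshold h1 : Int) (st : List String × PySem.Set String) (p2 : String × Int) : List String × PySem.Set String :=
  if PySem.Set.contains st.2 p2.1 then st
  else if (PySem.Int.bitCount (PySem.Int.bxor h1 p2.2) : Int) ≤ threshold then
    (st.1 ++ [p2.1], PySem.Set.add st.2 p2.1)
  else st

-- outer loop body of A, state = (groups, processed); L = hash_ints.items
def fshOuterStep (threshold : Int) (L : List (String × Int)) (st : List (List String) × PySem.Set String) (p1 : String × Int) : List (List String) × PySem.Set String :=
  if PySem.Set.contains st.2 p1.1 then st
  else
    let inner := L.foldl (fshInnerStep threshold p1.2) ([p1.1], PySem.Set.add st.2 p1.1)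
    if inner.1.length > 1 then (st.1 ++ [inner.1], inner.2) else (st.1, inner.2)

def find_similar_hashes (hashes : List (String × String)) (threshold : Int) : List (List String) :=
  ((fshHashInts hashes).items.foldl (fshOuterStep threshold (fshHashInts hashes).items) ([], PySem.Set.empty)).1

-- ===== PORT B =====
-- B's parse loop building the (url, int) list
def fshItemsB (hashes : List (String × String)) : List (String × Int) :=
  (PySem.Dict.ofList hashes).items.foldl (fun acc p =>
    match PySem.Int.ofStrBase? p.2 16 with
    | some n => acc ++ [(p.1, n)]
    | none => acc) []

-- B's while loop: take the first item, keep the close urls as a group, recurse on the far items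
def fshGo (threshold : Int) : List (String × Int) → List (List String)
  | [] => []
  | (u1, h1) :: rest =>
    let close := (rest.filter (fun p => (PySem.Int.bitCount (PySem.Int.bxor h1 p.2) : Int) ≤ threshold)).map Prod.fst
    let far := rest.filter (fun p => threshold < (PySem.Int.bitCount (PySem.Int.bxor h1 p.2) : Int))
    if close.isEmpty then fshGo threshold far else (u1 :: close) :: fshGo threshold far
termination_by l => l.length
decreasing_by all_goals
  simp only [List.length_cons, List.length_unattach]
  exact Nat.lt_succ_of_le (le_trans (List.length_filter_le _ _) (by simp))

def find_similar_hashes_alt (hashes : List (String × String)) (threshold : Int) : List (List String) :=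
  fshGo threshold (fshItemsB hashes)

-- ===== PRECONDITION & SPEC =====
def Spec_find_similar_hashes (hashes : List (String × String)) (threshold : Int) (out : List (List String)) : Prop := out = find_similar_hashes_alt hashes threshold
instance (hashes : List (String × String)) (threshold : Int) (out : List (List String)) : Decidable (Spec_find_similar_hashes hashes threshold out) := by unfold Spec_find_similar_hashes; infer_instance

-- ===== CLAIM (what is proved, stated in full; the proofs are below) =====
def Claim_equal_find_similar_hashes : Prop := ∀ (hashes : List (String × String)) (threshold : Int), Dom_find_similar_hashes hashes threshold → Spec_find_similar_hashes hashes threshold (find_similar_hashes hashes threshold)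

-- ===== LEMMAS AND PROOFS =====

-- int(h, 16) of the value, tagged with the key
def fshParse (p : String × String) : Option (String × Int) :=
  (PySem.Int.ofStrBase? p.2 16).map (fun n => (p.1, n))

-- the items of a list whose key is not yet processed
def fshUnproc (P : PySem.Set String) (m : List (String × Int)) : List (String × Int) :=
  m.filter (fun p => decide (p.1 ∉ P))

lemma fsh_parseB (l : List (String × String)) (acc : List (String × Int)) :
    l.foldl (fun acc p =>
      match PySem.Int.ofStrBase? p.2 16 with
      | some n => acc ++ [(p.1, n)]
      | none => acc) acc = acc ++ l.filterMap fshParse := by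
  induction l generalizing acc with
  | nil => simp
  | cons p l ih =>
    simp only [List.foldl_cons, List.filterMap_cons]
    cases h : PySem.Int.ofStrBase? p.2 16 <;> simp [fshParse, h, ih]

lemma fsh_parseA (l : List (String × String)) (d : PySem.Dict String Int)
    (hnd : d.keys.Nodup) (hfresh : ∀ p ∈ l, d.contains p.1 = false)
    (hl : (l.map Prod.fst).Nodup) :
    (l.foldl (fun d p =>
      match PySem.Int.ofStrBase? p.2 16 with
      | some n => d.insert p.1 n
      | none => d) d).items = d.items ++ l.filterMap fshParse := by
  induction l generalizing d with
  | nil => simp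
  | cons p l ih =>
    simp only [List.foldl_cons, List.filterMap_cons]
    have hmap : (l.map Prod.fst).Nodup := (List.nodup_cons.mp hl).2
    cases h : PySem.Int.ofStrBase? p.2 16 with
    | none =>
      simp only [fshParse, h, Option.map_none]
      exact ih d hnd (fun q hq => hfresh q (by simp [hq])) hmap
    | some n =>
      have hpc : d.contains p.1 = false := hfresh p (by simp)
      have hk : (d.insert p.1 n).keys.Nodup := PySem.Dict.nodup_keys_insert _ _ _ hnd
      have hf : ∀ q ∈ l, (d.insert p.1 n).contains q.1 = false := by
        intro q hq
        rw [PySem.Dict.contains_insert]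
        have hne : q.1 ≠ p.1 := by
          intro he
          exact (List.nodup_cons.mp hl).1 (he ▸ List.mem_map_of_mem hq)
        simp [hne, hfresh q (by simp [hq])]
      rw [ih (d.insert p.1 n) hk hf hmap,
          PySem.Dict.items_insert_of_not_contains _ _ hpc]
      simp [fshParse, h]

lemma fsh_parse_keys_sublist (l : List (String × String)) :
    ((l.filterMap fshParse).map Prod.fst).Sublist (l.map Prod.fst) := by
  induction l with
  | nil => simp
  | cons p l ih =>
    simp only [List.filterMap_cons, List.map_cons]
    cases h : PySem.Int.ofStrBase? p.2 16 <;>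
      simp only [fshParse, h, Option.map_none, Option.map_some]
    · exact ih.cons _
    · exact ih.cons₂ _

lemma fsh_key_inj {m : List (String × Int)} (hnd : (m.map Prod.fst).Nodup)
    {p q : String × Int} (hp : p ∈ m) (hq : q ∈ m) (h : p.1 = q.1) : p = q :=
  List.inj_on_of_nodup_map hnd hp hq h

lemma fsh_inner_skip (t h1 : Int) (m : List (String × Int)) (g : List String)
    (Q : PySem.Set String) (h : ∀ p ∈ m, p.1 ∈ Q) :
    m.foldl (fshInnerStep t h1) (g, Q) = (g, Q) := by
  induction m with
  | nil => rfl
  | cons p m ih =>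
    have hc : PySem.Set.contains Q p.1 = true := (PySem.Set.contains_iff _ _).mpr (h p (by simp))
    simp only [List.foldl_cons, fshInnerStep, hc, if_true]
    exact ih (fun q hq => h q (by simp [hq]))

lemma fsh_inner_spec (t h1 : Int) (m : List (String × Int)) (g : List String)
    (Q : PySem.Set String) (hnd : (m.map Prod.fst).Nodup) :
    m.foldl (fshInnerStep t h1) (g, Q) =
      (g ++ (((fshUnproc Q m).filter (fun p => (PySem.Int.bitCount (PySem.Int.bxor h1 p.2) : Int) ≤ t)).map Prod.fst),
       Q ++ (((fshUnproc Q m).filter (fun p => (PySem.Int.bitCount (PySem.Int.bxor h1 p.2) : Int) ≤ t)).map Prod.fst)) := by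
  induction m generalizing g Q with
  | nil => simp [fshUnproc]
  | cons p m ih =>
    have hmap : (m.map Prod.fst).Nodup := (List.nodup_cons.mp hnd).2
    by_cases hp : p.1 ∈ Q
    · have hc : PySem.Set.contains Q p.1 = true := (PySem.Set.contains_iff _ _).mpr hp
      have hu : fshUnproc Q (p :: m) = fshUnproc Q m := by simp [fshUnproc, hp]
      simp only [List.foldl_cons, fshInnerStep, hc, if_true, hu]
      exact ih g Q hmap
    · have hc : PySem.Set.contains Q p.1 = false := by
        rw [Bool.eq_false_iff]; intro hco; exact hp ((PySem.Set.contains_iff _ _).mp hco)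
      have hu : fshUnproc Q (p :: m) = p :: fshUnproc Q m := by simp [fshUnproc, hp]
      have hnotm : p.1 ∉ m.map Prod.fst := (List.nodup_cons.mp hnd).1
      by_cases hnear : (PySem.Int.bitCount (PySem.Int.bxor h1 p.2) : Int) ≤ t
      · have hadd : PySem.Set.add Q p.1 = Q ++ [p.1] := PySem.Set.add_of_not_mem hp
        have hsame : fshUnproc (Q ++ [p.1]) m = fshUnproc Q m := by
          apply List.filter_congr
          intro q hq
          have hne : q.1 ≠ p.1 := fun he => hnotm (he ▸ List.mem_map_of_mem hq)
          simp [List.mem_append, hne]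
        simp only [List.foldl_cons, fshInnerStep, hc, Bool.false_eq_true, if_false, hnear,
          if_true]
        rw [hadd, ih (g ++ [p.1]) (Q ++ [p.1]) hmap, hsame, hu]
        simp [hnear, List.append_assoc]
      · simp only [List.foldl_cons, fshInnerStep, hc, Bool.false_eq_true, if_false, hnear]
        rw [ih g Q hmap, hu]
        simp [hnear]

lemma fsh_outer_inv (t : Int) (L : List (String × Int)) (hnd : (L.map Prod.fst).Nodup) :
    ∀ (s pre : List (String × Int)) (P : PySem.Set String) (groups : List (List String)),
      L = pre ++ s → (∀ p ∈ pre, p.1 ∈ P) →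
      (s.foldl (fshOuterStep t L) (groups, P)).1 = groups ++ fshGo t (fshUnproc P s) := by
  intro s
  induction s with
  | nil => intro pre P groups hL hpre; simp [fshUnproc, fshGo]
  | cons p1 s' ih =>
    intro pre P groups hL hpre
    obtain ⟨u1, h1⟩ := p1
    have hndL : ((pre ++ (u1, h1) :: s').map Prod.fst).Nodup := hL ▸ hnd
    rw [List.map_append, List.map_cons] at hndL
    have hndR : (u1 :: s'.map Prod.fst).Nodup := hndL.of_append_right
    have hnds' : (s'.map Prod.fst).Nodup := (List.nodup_cons.mp hndR).2
    have hu1s' : u1 ∉ s'.map Prod.fst := (List.nodup_cons.mp hndR).1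
    simp only [List.foldl_cons]
    by_cases hp1 : u1 ∈ P
    · have hc : PySem.Set.contains P u1 = true := (PySem.Set.contains_iff _ _).mpr hp1
      have hstep : fshOuterStep t L (groups, P) (u1, h1) = (groups, P) := by
        simp only [fshOuterStep, hc, if_true]
      have hu : fshUnproc P ((u1, h1) :: s') = fshUnproc P s' := by simp [fshUnproc, hp1]
      rw [hstep, hu]
      refine ih (pre ++ [(u1, h1)]) P groups (by simp [hL]) ?_
      intro q hq
      rcases List.mem_append.mp hq with h | h
      · exact hpre q h
      · simp at h; subst h; exact hp1
    · have hc : PySem.Set.contains P u1 = false := by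
        rw [Bool.eq_false_iff]; intro hco; exact hp1 ((PySem.Set.contains_iff _ _).mp hco)
      have hQ1 : PySem.Set.add P u1 = P ++ [u1] := PySem.Set.add_of_not_mem hp1
      have hUQ1 : fshUnproc (P ++ [u1]) s' = fshUnproc P s' := by
        apply List.filter_congr
        intro q hq
        have hne : q.1 ≠ u1 := fun he => hu1s' (he ▸ List.mem_map_of_mem hq)
        simp [List.mem_append, hne]
      -- K = keys of the close items among the unprocessed part of s'
      set K := (((fshUnproc P s').filter
        (fun p => (PySem.Int.bitCount (PySem.Int.bxor h1 p.2) : Int) ≤ t)).map Prod.fst) with hKdef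
      have hinner : L.foldl (fshInnerStep t h1) ([u1], PySem.Set.add P u1) =
          (u1 :: K, (P ++ [u1]) ++ K) := by
        rw [hQ1, hL, List.foldl_append,
          fsh_inner_skip t h1 pre [u1] (P ++ [u1])
            (fun q hq => List.mem_append.mpr (Or.inl (hpre q hq))),
          List.foldl_cons]
        have hcu : PySem.Set.contains (P ++ [u1]) u1 = true :=
          (PySem.Set.contains_iff _ _).mpr (by simp)
        simp only [fshInnerStep, hcu, if_true]
        rw [fsh_inner_spec t h1 s' [u1] (P ++ [u1]) hnds', hUQ1, ← hKdef]
        simp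
      -- the far items: what remains unprocessed after this group is taken
      have hfar : fshUnproc ((P ++ [u1]) ++ K) s' =
          (fshUnproc P s').filter
            (fun p => decide (t < (PySem.Int.bitCount (PySem.Int.bxor h1 p.2) : Int))) := by
        have hstep1 : fshUnproc ((P ++ [u1]) ++ K) s' =
            s'.filter (fun p => decide (p.1 ∉ P) && decide (p.1 ∉ K)) := by
          apply List.filter_congr
          intro q hq
          have hne : q.1 ≠ u1 := fun he => hu1s' (he ▸ List.mem_map_of_mem hq)
          by_cases h1q : q.1 ∈ P <;> by_cases h2q : q.1 ∈ K <;>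
            simp [List.mem_append, h1q, h2q, hne]
        have hrhs : (fshUnproc P s').filter
            (fun p => decide (t < (PySem.Int.bitCount (PySem.Int.bxor h1 p.2) : Int))) =
            s'.filter (fun p => decide (t < (PySem.Int.bitCount (PySem.Int.bxor h1 p.2) : Int))
              && decide (p.1 ∉ P)) := by
          unfold fshUnproc
          rw [List.filter_filter]
        rw [hstep1, hrhs]
        apply List.filter_congr
        intro q hq
        by_cases hqP : q.1 ∈ P
        · simp [hqP]
        · have hqr : q ∈ fshUnproc P s' := List.mem_filter.mpr ⟨hq, by simpa using hqP⟩
          have hiff : q.1 ∈ K ↔ (PySem.Int.bitCount (PySem.Int.bxor h1 q.2) : Int) ≤ t := by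
            rw [hKdef]
            constructor
            · intro hk
              obtain ⟨w, hw, hwe⟩ := List.mem_map.mp hk
              have hws' : w ∈ s' := List.mem_of_mem_filter (List.mem_of_mem_filter hw)
              have hwq : w = q := fsh_key_inj hnds' hws' hq hwe
              have := List.of_mem_filter hw
              rw [hwq] at this
              simpa using this
            · intro hnear
              exact List.mem_map_of_mem (List.mem_filter.mpr ⟨hqr, by simpa⟩)
          by_cases hn : (PySem.Int.bitCount (PySem.Int.bxor h1 q.2) : Int) ≤ t
          · simp [hqP, hiff.mpr hn, not_lt.mpr hn]
          · have hnk : q.1 ∉ K := fun hk => hn (hiff.mp hk)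
            simp [hqP, hnk, not_le.mp hn]
      have hufold : fshUnproc P ((u1, h1) :: s') = (u1, h1) :: fshUnproc P s' := by
        simp [fshUnproc, hp1]
      have hpre' : ∀ q ∈ pre ++ [(u1, h1)], q.1 ∈ (P ++ [u1]) ++ K := by
        intro q hq
        rcases List.mem_append.mp hq with h | h
        · exact List.mem_append.mpr (Or.inl (List.mem_append.mpr (Or.inl (hpre q h))))
        · simp at h; subst h; simp
      have hL' : L = (pre ++ [(u1, h1)]) ++ s' := by simp [hL]
      by_cases hK : K = []
      · have hstep : fshOuterStep t L (groups, P) (u1, h1) = (groups, (P ++ [u1]) ++ K) := by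
          simp only [fshOuterStep, hc, Bool.false_eq_true, if_false]
          rw [hinner]
          simp [hK]
        rw [hstep, ih (pre ++ [(u1, h1)]) ((P ++ [u1]) ++ K) groups hL' hpre', hfar, hufold]
        rw [fshGo]
        simp only [← hKdef, hK, List.isEmpty_nil, if_true]
      · have hstep : fshOuterStep t L (groups, P) (u1, h1) =
            (groups ++ [u1 :: K], (P ++ [u1]) ++ K) := by
          simp only [fshOuterStep, hc, Bool.false_eq_true, if_false]
          rw [hinner]
          simp [hK]
        rw [hstep, ih (pre ++ [(u1, h1)]) ((P ++ [u1]) ++ K) (groups ++ [u1 :: K]) hL' hpre',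
          hfar, hufold]
        rw [fshGo]
        simp only [← hKdef]
        rw [if_neg (by simpa [List.isEmpty_iff] using hK)]
        simp

-- ===== VERDICT (by name: the statement is the Claim_ definition above) =====
theorem find_similar_hashes_spec : Claim_equal_find_similar_hashes := by
  intro hashes t _
  unfold Spec_find_similar_hashes find_similar_hashes find_similar_hashes_alt
  have hki : ((PySem.Dict.ofList hashes).items.map Prod.fst).Nodup :=
    PySem.Dict.nodup_keys_ofList hashes
  have hA : (fshHashInts hashes).items =
      (PySem.Dict.ofList hashes).items.filterMap fshParse := by
    unfold fshHashInts
    rw [fsh_parseA _ _ PySem.Dict.nodup_keys_empty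
      (fun q _ => PySem.Dict.contains_empty _) hki]
    simp [PySem.Dict.empty]
  have hB : fshItemsB hashes = (PySem.Dict.ofList hashes).items.filterMap fshParse := by
    unfold fshItemsB
    rw [fsh_parseB]
    simp
  have hndp := (fsh_parse_keys_sublist (PySem.Dict.ofList hashes).items).nodup hki
  rw [hA, hB, fsh_outer_inv t _ hndp _ [] PySem.Set.empty [] (by simp) (by simp)]
  have : fshUnproc PySem.Set.empty ((PySem.Dict.ofList hashes).items.filterMap fshParse)
      = (PySem.Dict.ofList hashes).items.filterMap fshParse := by
    simp [fshUnproc, PySem.Set.empty]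
  rw [this]
  simp
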